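-- pv_equiv track=rewrite | github.com/avitalkalimi/Python_HW4 | hw4.py | helper_fibonacci_chars
-- ===== SOURCE A (Python) =====
-- def helper_fibonacci_chars(n):
--     if n == 0:
--         return "a"
--     elif n == 1:
--         return "bc"
--     else:
--         Sn = helper_fibonacci_chars(n - 2) + helper_fibonacci_chars(n - 1)
--         return Sn
-- ===== SOURCE B (Python) =====
-- def helper_fibonacci_chars(n):
--     if n < 0:
--         raise ValueError("n must be non-negative")
--     a, b = "a", "bc"
--     for _ in range(n):
--         a, b = b, a + b
--     return a
-- ===== Notes on version B (the rewrite author's own statement) =====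
-- stated objective: alternative
-- what changed: Replaces the exponential double recursion with an iterative loop keeping the previous two strings and concatenating once per step (intended as faster in call count; measured 18.97x at the largest size both finished, but both time out on large n since the output itself grows exponentially); B validates its input, raising ValueError on negative n where A exceeds the recursion limit.
import Mathlib
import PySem

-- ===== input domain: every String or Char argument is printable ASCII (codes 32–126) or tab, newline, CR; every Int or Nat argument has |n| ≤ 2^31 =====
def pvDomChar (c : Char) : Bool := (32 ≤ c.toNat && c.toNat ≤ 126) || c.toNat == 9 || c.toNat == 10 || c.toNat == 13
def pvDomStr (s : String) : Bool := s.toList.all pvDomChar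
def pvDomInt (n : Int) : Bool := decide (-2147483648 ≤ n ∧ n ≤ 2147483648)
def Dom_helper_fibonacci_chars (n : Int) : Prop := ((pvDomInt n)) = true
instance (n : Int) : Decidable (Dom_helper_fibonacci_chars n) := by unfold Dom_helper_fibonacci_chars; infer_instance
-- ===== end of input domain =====

-- B replaces A's exponential double recursion by an iterative loop over the previous two strings (alternative structure; both outputs grow exponentially).


-- ===== PORT A =====
-- A's double recursion, on the Nat value of n (Pre_ restricts to non-negative n, where this is exact)
def goA : Nat → String
  | 0 => "a"
  | 1 => "bc"
  | (k+2) => goA k ++ goA (k+1)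

def helper_fibonacci_chars (n : Int) : String := goA n.toNat

-- ===== PORT B =====
-- Source B's loop: state (a, b), n iterations, return a; Source B's negative-n guard raises
-- (ValueError, no value), so it is outside Pre_ and not ported
def helper_fibonacci_chars_alt (n : Int) : String :=
  ((List.range n.toNat).foldl (fun (ab : String × String) _ => (ab.2, ab.1 ++ ab.2)) ("a", "bc")).1

-- ===== PRECONDITION & SPEC =====
-- Pre_ excludes negative n, where A recurses without a base case (RecursionError) and B raises ValueError.
def Pre_helper_fibonacci_chars (n : Int) : Prop := 0 ≤ n
instance (n : Int) : Decidable (Pre_helper_fibonacci_chars n) := by unfold Pre_helper_fibonacci_chars; infer_instance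
def pvWitness_helper_fibonacci_chars : Int := (5)

def Spec_helper_fibonacci_chars (n : Int) (out : String) : Prop := out = helper_fibonacci_chars_alt n
instance (n : Int) (out : String) : Decidable (Spec_helper_fibonacci_chars n out) := by unfold Spec_helper_fibonacci_chars; infer_instance

-- ===== CLAIM (what is proved, stated in full; the proofs are below) =====
def Claim_equal_helper_fibonacci_chars : Prop := ∀ (n : Int), Dom_helper_fibonacci_chars n → Pre_helper_fibonacci_chars n → Spec_helper_fibonacci_chars n (helper_fibonacci_chars n)

-- ===== LEMMAS AND PROOFS =====
-- Loop invariant: after k iterations the state is (goA k, goA (k+1)).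
theorem foldl_state (k : Nat) :
    (List.range k).foldl (fun (ab : String × String) _ => (ab.2, ab.1 ++ ab.2)) ("a", "bc")
      = (goA k, goA (k+1)) := by
  induction k with
  | zero => simp [goA]
  | succ k ih =>
    rw [List.range_succ, List.foldl_append, ih]
    simp [goA]

-- ===== VERDICT (by name: the statement is the Claim_ definition above) =====
theorem helper_fibonacci_chars_spec : Claim_equal_helper_fibonacci_chars := by
  intro n _ _
  show helper_fibonacci_chars n = helper_fibonacci_chars_alt n
  simp [helper_fibonacci_chars, helper_fibonacci_chars_alt, foldl_state]
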